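-- pv_equiv track=rewrite | github.com/NickMakeThing/rock-paper-scissors | backend/rockpaperscissors/match_maker.py | match_players_if_they_map_to_eachother
-- ===== SOURCE A (Python) =====
-- def match_players_if_they_map_to_eachother(closest_scores):
--     matches=[]
--     closest_scores_copy=closest_scores.copy()
--     for k,v in closest_scores.items():
--         if v in closest_scores_copy and closest_scores_copy[v] == k:
--             del closest_scores_copy[k]
--
--     for k,v in closest_scores_copy.items():
--         if closest_scores[v] == k:
--             matches.append([k,v])
--     return matches
-- ===== SOURCE B (Python) =====
-- def match_players_if_they_map_to_eachother(closest_scores):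
--     matches = []
--     seen = set()
--     for k, v in closest_scores.items():
--         if closest_scores[v] == k and v in seen:
--             matches.append([k, v])
--         seen.add(k)
--     return matches
-- ===== Notes on version B (the rewrite author's own statement) =====
-- stated objective: simpler
-- what changed: A's mark-and-delete pass over a mutated dict copy followed by a second re-scan pass is replaced by a single pass over the items with a `seen` set of already-visited keys, emitting [k,v] when closest_scores[v]==k and v was seen earlier.
import Mathlib
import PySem

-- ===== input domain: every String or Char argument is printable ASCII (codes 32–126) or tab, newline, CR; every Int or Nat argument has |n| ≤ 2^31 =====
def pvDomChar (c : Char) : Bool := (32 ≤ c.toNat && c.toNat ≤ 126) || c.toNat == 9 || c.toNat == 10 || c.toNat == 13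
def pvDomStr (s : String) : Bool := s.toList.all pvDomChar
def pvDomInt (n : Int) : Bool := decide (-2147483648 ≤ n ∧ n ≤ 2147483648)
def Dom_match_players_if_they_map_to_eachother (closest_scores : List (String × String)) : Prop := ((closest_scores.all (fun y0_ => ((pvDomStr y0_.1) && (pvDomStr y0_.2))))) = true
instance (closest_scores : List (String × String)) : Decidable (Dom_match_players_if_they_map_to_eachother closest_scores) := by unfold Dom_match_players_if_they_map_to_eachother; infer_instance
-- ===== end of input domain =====

-- B replaces A's two passes (mark-and-delete on a dict copy, then re-scan) by a single pass over the
-- dict with a `seen` set of already-visited keys — simpler and one traversal instead of two.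

-- ===== PORT A =====
-- first loop body: 'if v in closest_scores_copy and closest_scores_copy[v] == k: del closest_scores_copy[k]'
def pvStepA1 (c : PySem.Dict String String) (p : String × String) : PySem.Dict String String :=
  match c.get? p.2 with
  | some x => if x == p.1 then c.erase p.1 else c
  | none => c

-- second loop body: 'if closest_scores[v] == k: matches.append([k,v])'
-- (the `none` branch is Python's KeyError on closest_scores[v]; those inputs are excluded by Pre_)
def pvStepA2 (d : PySem.Dict String String) (m : List (List String)) (p : String × String) : List (List String) :=
  match d.get? p.2 with
  | some x => if x == p.1 then m ++ [[p.1, p.2]] else m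
  | none => m

def match_players_if_they_map_to_eachother (closest_scores : List (String × String)) : List (List String) :=
  let d := PySem.Dict.ofList closest_scores
  let copy := d.items.foldl pvStepA1 d
  copy.items.foldl (pvStepA2 d) []

-- ===== PORT B =====
-- loop body of B: lookup closest_scores[v] (KeyError = none, excluded by Pre_), emit if mutual and v seen, add k to seen
def pvStepB (d : PySem.Dict String String) (st : List (List String) × PySem.Set String) (p : String × String) : List (List String) × PySem.Set String :=
  let m := match d.get? p.2 with
    | some x => if x == p.1 && st.2.contains p.2 then st.1 ++ [[p.1, p.2]] else st.1
    | none => st.1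
  (m, st.2.add p.1)

def match_players_if_they_map_to_eachother_alt (closest_scores : List (String × String)) : List (List String) :=
  let d := PySem.Dict.ofList closest_scores
  (d.items.foldl (pvStepB d) ([], PySem.Set.empty)).1

-- ===== PRECONDITION & SPEC =====
-- Pre_ excludes exactly the inputs on which Python A raises KeyError: some value of the dict is not a key
-- (the lookup closest_scores[v] in A's second loop fails there; B raises the same KeyError).
def Pre_match_players_if_they_map_to_eachother (closest_scores : List (String × String)) : Prop :=
  ∀ p ∈ (PySem.Dict.ofList closest_scores).items, (PySem.Dict.ofList closest_scores).contains p.2 = true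
instance (closest_scores : List (String × String)) : Decidable (Pre_match_players_if_they_map_to_eachother closest_scores) := by unfold Pre_match_players_if_they_map_to_eachother; infer_instance

def pvWitness_match_players_if_they_map_to_eachother : (List (String × String)) := [("a", "b"), ("b", "a"), ("c", "c")]

def Spec_match_players_if_they_map_to_eachother (closest_scores : List (String × String)) (out : List (List String)) : Prop := out = match_players_if_they_map_to_eachother_alt closest_scores
instance (closest_scores : List (String × String)) (out : List (List String)) : Decidable (Spec_match_players_if_they_map_to_eachother closest_scores out) := by unfold Spec_match_players_if_they_map_to_eachother; infer_instance

-- ===== CLAIM (what is proved, stated in full; the proofs are below) =====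
def Claim_equal_match_players_if_they_map_to_eachother : Prop := ∀ (closest_scores : List (String × String)), Dom_match_players_if_they_map_to_eachother closest_scores → Pre_match_players_if_they_map_to_eachother closest_scores → Spec_match_players_if_they_map_to_eachother closest_scores (match_players_if_they_map_to_eachother closest_scores)

-- ===== LEMMAS AND PROOFS =====

-- entries of A's first-loop dict copy that SURVIVE the pass, given the keys `seen` before the pass
def pvSurv (d : PySem.Dict String String) : List (String × String) → List String → List (String × String)
  | [], _ => []
  | q :: rest, seen =>
    if (d.get? q.2 == some q.1) && !(seen.contains q.2)
    then pvSurv d rest (seen ++ [q.1])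
    else q :: pvSurv d rest (seen ++ [q.1])

theorem pvSurv_subset (d : PySem.Dict String String) (X : List (String × String)) :
    ∀ seen q, q ∈ pvSurv d X seen → q ∈ X := by
  induction X with
  | nil => intro seen q h; simp [pvSurv] at h
  | cons p rest ih =>
    intro seen q h
    simp only [pvSurv] at h
    split at h
    · exact List.mem_cons_of_mem _ (ih _ _ h)
    · rcases List.mem_cons.mp h with h | h
      · exact h ▸ List.mem_cons_self
      · exact List.mem_cons_of_mem _ (ih _ _ h)

theorem pvSurv_append (d : PySem.Dict String String) (X Y : List (String × String)) :
    ∀ seen, pvSurv d (X ++ Y) seen = pvSurv d X seen ++ pvSurv d Y (seen ++ X.map Prod.fst) := by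
  induction X with
  | nil => intro seen; simp [pvSurv]
  | cons p rest ih =>
    intro seen
    simp only [List.cons_append, pvSurv]
    split
    · rw [ih]; simp
    · rw [ih]; simp

theorem pvSurv_mutual_deleted (d : PySem.Dict String String) (P1 P2 : List (String × String)) (v k : String)
    (hk : d.get? k = some v) (hknP : k ∉ P1.map Prod.fst)
    (hv1 : v ∉ P1.map Prod.fst) (hv2 : v ∉ P2.map Prod.fst) :
    v ∉ (pvSurv d (P1 ++ (v, k) :: P2) []).map Prod.fst := by
  rw [pvSurv_append]
  simp only [pvSurv, hk]
  have hc : (P1.map Prod.fst).contains k = false := by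
    simpa using hknP
  simp only [List.nil_append, hc]
  intro hmem
  simp only [List.map_append, List.mem_append] at hmem
  rcases hmem with h | h
  · rcases List.mem_map.mp h with ⟨q, hq, hq1⟩
    exact hv1 (List.mem_map.mpr ⟨q, pvSurv_subset d P1 _ _ hq, hq1⟩)
  · simp only [beq_self_eq_true, Bool.true_and, Bool.not_false, if_true] at h
    rcases List.mem_map.mp h with ⟨q, hq, hq1⟩
    exact hv2 (List.mem_map.mpr ⟨q, pvSurv_subset d P2 _ _ hq, hq1⟩)

def pvEmits (d : PySem.Dict String String) : List (String × String) → List String → List (String × String)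
  | [], _ => []
  | q :: rest, seen =>
    if (d.get? q.2 == some q.1) && seen.contains q.2
    then q :: pvEmits d rest (seen ++ [q.1])
    else pvEmits d rest (seen ++ [q.1])



theorem pvLoop2 (d : PySem.Dict String String) :
    ∀ (X : List (String × String)) (seen : List String) (acc : List (List String)),
      (pvSurv d X seen).foldl (pvStepA2 d) acc = acc ++ (pvEmits d X seen).map (fun q => [q.1, q.2]) := by
  intro X
  induction X with
  | nil => intro seen acc; simp [pvSurv, pvEmits]
  | cons q rest ih =>
    intro seen acc
    simp only [pvSurv, pvEmits]
    rcases hq : d.get? q.2 with _ | x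
    · have hstep : pvStepA2 d acc q = acc := by simp [pvStepA2, hq]
      simp [hq, hstep, ih]
    · by_cases hx : x = q.1
      · subst hx
        rcases hs : seen.contains q.2 with _ | _
        · simp [hq, hs, ih]
        · have hstep : pvStepA2 d acc q = acc ++ [[q.1, q.2]] := by simp [pvStepA2, hq]
          simp [hq, hs, hstep, ih]
      · have hstep : pvStepA2 d acc q = acc := by simp [pvStepA2, hq, hx]
        simp [hq, hx, hstep, ih]

theorem pvLoopB (d : PySem.Dict String String) :
    ∀ (X : List (String × String)) (s : PySem.Set String) (seen : List String)
      (acc : List (List String)),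
      (∀ y, s.contains y = seen.contains y) →
      (X.foldl (pvStepB d) (acc, s)).1 = acc ++ (pvEmits d X seen).map (fun q => [q.1, q.2]) := by
  intro X
  induction X with
  | nil => intro s seen acc h; simp [pvEmits]
  | cons q rest ih =>
    intro s seen acc h
    have hmem : ∀ y, y ∈ s ↔ y ∈ seen := by
      intro y
      constructor
      · intro hy
        have := (PySem.Set.contains_iff s y).mpr hy
        rw [h] at this; simpa using this
      · intro hy
        apply (PySem.Set.contains_iff s y).mp
        rw [h]; simpa using hy
    have hadd : ∀ y, (s.add q.1).contains y = (seen ++ [q.1]).contains y := by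
      intro y
      rcases hy : (s.add q.1).contains y with _ | _
      · have hnot : ¬ (y ∈ s ∨ y = q.1) := by
          intro hm
          have := (PySem.Set.contains_iff (s.add q.1) y).mpr ((PySem.Set.mem_add s q.1 y).mpr hm)
          rw [hy] at this; exact Bool.false_ne_true this
        symm
        simp only [List.contains_eq_mem, decide_eq_false_iff_not]
        simp only [List.mem_append, List.mem_singleton]
        rw [← hmem y]
        tauto
      · have := (PySem.Set.mem_add s q.1 y).mp ((PySem.Set.contains_iff (s.add q.1) y).mp hy)
        symm
        simp only [List.contains_eq_mem, decide_eq_true_eq, List.mem_append, List.mem_singleton]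
        rw [← hmem y]
        tauto
    simp only [List.foldl_cons, pvEmits]
    rcases hq : d.get? q.2 with _ | x
    · have hstep : pvStepB d (acc, s) q = (acc, s.add q.1) := by simp [pvStepB, hq]
      rw [hstep]
      simp only [hq, Option.none_beq_some, Bool.false_and, Bool.false_eq_true, if_false]
      exact ih _ _ _ hadd
    · by_cases hx : x = q.1
      · subst hx
        rcases hs : seen.contains q.2 with _ | _
        · have hns : q.2 ∉ s := by
            intro hm
            have : seen.contains q.2 = true := by
              simpa using (hmem q.2).mp hm
            rw [hs] at this; exact Bool.false_ne_true this
          have hstep : pvStepB d (acc, s) q = (acc, s.add q.1) := by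
            simp [pvStepB, hq, hns]
          rw [hstep]
          simp only [hq, hs, beq_self_eq_true, Bool.true_and, Bool.false_eq_true, if_false]
          exact ih _ _ _ hadd
        · have hins : q.2 ∈ s := (hmem q.2).mpr (by simpa using hs)
          have hstep : pvStepB d (acc, s) q = (acc ++ [[q.1, q.2]], s.add q.1) := by
            simp [pvStepB, hq, hins]
          rw [hstep]
          simp only [hq, hs, beq_self_eq_true, Bool.true_and, if_true]
          rw [ih _ _ _ hadd]
          simp
      · have hstep : pvStepB d (acc, s) q = (acc, s.add q.1) := by
          simp [pvStepB, hq, hx]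
        rw [hstep]
        have hbeq2 : (some x == some q.1) = false := by simp [hx]
        simp only [hq, hbeq2, Bool.false_and, Bool.false_eq_true, if_false]
        exact ih _ _ _ hadd


-- find? by key skips a prefix whose keys avoid v
theorem pvFind?_append_skip (X Y : List (String × String)) (v : String)
    (hv : v ∉ X.map Prod.fst) :
    (X ++ Y).find? (fun p => p.1 == v) = Y.find? (fun p => p.1 == v) := by
  rw [List.find?_append]
  have : X.find? (fun p => p.1 == v) = none := by
    rw [List.find?_eq_none]
    intro p hp hbe
    exact hv (List.mem_map.mpr ⟨p, hp, by simpa using hbe⟩)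
  rw [this, Option.none_or]

theorem pvLoop1 (d : PySem.Dict String String) (hnd : (d.items.map Prod.fst).Nodup) :
    ∀ (S P : List (String × String)) (c : PySem.Dict String String),
      d.items = P ++ S → c.items = pvSurv d P [] ++ S →
      (S.foldl pvStepA1 c).items = pvSurv d d.items [] := by
  intro S
  induction S with
  | nil =>
    intro P c hd hc
    simp only [List.foldl_nil]
    rw [hc, hd]
    simp
  | cons q S' ih =>
    intro P c hd hc
    obtain ⟨k, v⟩ := q
    have hnd' : ((P ++ (k, v) :: S').map Prod.fst).Nodup := hd ▸ hnd
    simp only [List.map_append, List.map_cons] at hnd'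
    have hknP : k ∉ P.map Prod.fst := by
      intro hm
      exact (List.disjoint_of_nodup_append hnd') hm (by simp)
    have hknS : k ∉ S'.map Prod.fst := by
      have := (List.nodup_append.mp hnd').2.1
      simpa using (List.nodup_cons.mp this).1
    have hPnd : (P.map Prod.fst).Nodup := (List.nodup_append.mp hnd').1
    have hkv_mem : (k, v) ∈ d.items := by rw [hd]; simp
    have hgk : d.get? k = some v :=
      PySem.Dict.get?_of_mem_items d hkv_mem hnd
    -- the runtime test of A's first loop equals the pvSurv condition
    have hcond : (c.get? v == some k) = ((d.get? v == some k) && !((P.map Prod.fst).contains v)) := by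
      by_cases hvP : v ∈ P.map Prod.fst
      · -- v is an earlier key: condition is false at runtime too
        have hvnk : v ≠ k := fun h => hknP (h ▸ hvP)
        have hvnS : v ∉ S'.map Prod.fst := by
          intro hm
          exact (List.disjoint_of_nodup_append hnd') hvP (by simp [hm])
        have hget : c.get? v = ((pvSurv d P []).find? (fun p => p.1 == v)).map Prod.snd := by
          show (c.items.find? (fun p => p.1 == v)).map Prod.snd = _
          rw [hc, List.find?_append]
          have : ((k, v) :: S').find? (fun p => p.1 == v) = none := by
            rw [List.find?_eq_none]
            intro p hp hbe
            have hpv : p.1 = v := by simpa using hbe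
            rcases List.mem_cons.mp hp with h | h
            · exact hvnk (by rw [← hpv, h])
            · exact hvnS (List.mem_map.mpr ⟨p, h, hpv⟩)
          rw [this, Option.or_none]
        have hne : ¬ (c.get? v == some k) = true := by
          intro hbe
          have hck : c.get? v = some k := by simpa using hbe
          rw [hget] at hck
          rcases hf : (pvSurv d P []).find? (fun p => p.1 == v) with _ | p
          · rw [hf] at hck; simp at hck
          · rw [hf] at hck
            have hp2 : p.2 = k := by simpa using hck
            have hp1 : p.1 = v := by simpa using List.find?_some hf
            have hpP : p ∈ P := pvSurv_subset d P _ _ (List.mem_of_find?_eq_some hf)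
            have hpd : p ∈ d.items := by rw [hd]; exact List.mem_append_left _ hpP
            have hgv : d.get? v = some k := by
              have := PySem.Dict.get?_of_mem_items d hpd hnd
              rw [hp1, hp2] at this; exact this
            -- mutual pair with v earlier: v was deleted from the copy
            obtain ⟨P1, P2, hP⟩ := List.append_of_mem (show (v, k) ∈ P by
              have : p = (v, k) := by
                obtain ⟨a, b⟩ := p; simp at hp1 hp2; rw [hp1, hp2]
              exact this ▸ hpP)
            have hv1 : v ∉ P1.map Prod.fst := by
              intro hm
              have := hP ▸ hPnd
              simp only [List.map_append, List.map_cons] at this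
              exact (List.disjoint_of_nodup_append this) hm (by simp)
            have hv2 : v ∉ P2.map Prod.fst := by
              have := hP ▸ hPnd
              simp only [List.map_append, List.map_cons] at this
              have := (List.nodup_append.mp this).2.1
              simpa using (List.nodup_cons.mp this).1
            have hk1 : k ∉ P1.map Prod.fst := by
              intro hm; exact hknP (by rw [hP]; simp [hm])
            have hdel := pvSurv_mutual_deleted d P1 P2 v k hgk hk1 hv1 hv2
            rw [← hP] at hdel
            exact hdel (List.mem_map.mpr ⟨p, List.mem_of_find?_eq_some hf, hp1⟩)
        have hcontains : (P.map Prod.fst).contains v = true := by simpa using hvP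
        rw [hcontains]
        simp only [Bool.not_true, Bool.and_false]
        exact Bool.eq_false_iff.mpr hne
      · -- v not an earlier key: the copy and the dict agree at v
        have hget : c.get? v = d.get? v := by
          show (c.items.find? (fun p => p.1 == v)).map Prod.snd
             = (d.items.find? (fun p => p.1 == v)).map Prod.snd
          rw [hc, hd, pvFind?_append_skip _ _ _ hvP, pvFind?_append_skip]
          intro hm
          rcases List.mem_map.mp hm with ⟨p, hp, hp1⟩
          exact hvP (List.mem_map.mpr ⟨p, pvSurv_subset d P _ _ hp, hp1⟩)
        have hcontains : (P.map Prod.fst).contains v = false := by simpa using hvP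
        rw [hget, hcontains]
        simp
    -- step the fold once
    simp only [List.foldl_cons]
    have hsurv_app : pvSurv d (P ++ [(k, v)]) []
        = pvSurv d P [] ++ pvSurv d [(k, v)] (P.map Prod.fst) := by
      rw [pvSurv_append]; simp
    rcases hrt : (c.get? v == some k) with _ | _
    · -- condition false: nothing deleted, (k,v) survives
      have hstep : pvStepA1 c (k, v) = c := by
        rcases hcv : c.get? v with _ | x
        · simp [pvStepA1, hcv]
        · have hxk : (x == k) = false := by
            rcases hxx : (x == k) with _ | _
            · rfl
            · exfalso
              have : c.get? v = some k := by rw [hcv]; simp [eq_of_beq hxx]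
              rw [this] at hrt; simp at hrt
          simp [pvStepA1, hcv, hxk]
      rw [hstep]
      apply ih (P ++ [(k, v)]) c
      · rw [hd]; simp
      · rw [hc, hsurv_app]
        have : pvSurv d [(k, v)] (P.map Prod.fst) = [(k, v)] := by
          simp only [pvSurv]
          rw [← hcond] at *
          simp [hrt]
        rw [this]; simp
    · -- condition true: delete k from the copy
      have hck : c.get? v = some k := by simpa using hrt
      have hstep : pvStepA1 c (k, v) = c.erase k := by
        simp [pvStepA1, hck]
      rw [hstep]
      apply ih (P ++ [(k, v)]) (c.erase k)
      · rw [hd]; simp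
      · show c.items.filter (fun p => !(p.1 == k)) = _
        rw [hc, hsurv_app]
        have h1 : (pvSurv d P []).filter (fun p => !(p.1 == k)) = pvSurv d P [] := by
          rw [List.filter_eq_self]
          intro p hp
          have : p.1 ≠ k := by
            intro h
            exact hknP (List.mem_map.mpr ⟨p, pvSurv_subset d P _ _ hp, h⟩)
          simpa using this
        have h2 : (((k, v) :: S').filter (fun p => !(p.1 == k))) = S' := by
          simp only [List.filter_cons]
          have : S'.filter (fun p => !(p.1 == k)) = S' := by
            rw [List.filter_eq_self]
            intro p hp
            have : p.1 ≠ k := fun h => hknS (List.mem_map.mpr ⟨p, hp, h⟩)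
            simpa using this
          simp [this]
        have h3 : pvSurv d [(k, v)] (P.map Prod.fst) = [] := by
          simp only [pvSurv]
          rw [← hcond] at *
          simp [hrt]
        rw [List.filter_append, h1, h2, h3]
        simp


-- ===== VERDICT (by name: the statement is the Claim_ definition above) =====
theorem match_players_if_they_map_to_eachother_spec : Claim_equal_match_players_if_they_map_to_eachother := by
  intro l _ _
  unfold Spec_match_players_if_they_map_to_eachother
  unfold match_players_if_they_map_to_eachother match_players_if_they_map_to_eachother_alt
  dsimp only
  have hnd : ((PySem.Dict.ofList l).items.map Prod.fst).Nodup :=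
    PySem.Dict.nodup_keys_ofList l
  have h1 : ((PySem.Dict.ofList l).items.foldl pvStepA1 (PySem.Dict.ofList l)).items
      = pvSurv (PySem.Dict.ofList l) (PySem.Dict.ofList l).items [] :=
    pvLoop1 _ hnd _ [] _ rfl rfl
  rw [h1, pvLoop2, pvLoopB _ _ _ [] _ (fun y => rfl)]
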